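-- pv_equiv track=rewrite | github.com/Monoliso/contract-whist | src/whist/logica.py | determinar_ganador_baza
-- ===== SOURCE A (Python) =====
-- VALORES = [str(i+1) for i in range(1, 10)] + ['J', 'Q', 'K', 'A']
--
-- def determinar_ganador_baza(mesa: dict, palo_baza_carta: tuple, triunfo: tuple) -> str:
--     """ Devuelve el jugador que ganó la baza. """
--
--     palo_triunfo = triunfo[1]
--     palo_baza = palo_baza_carta[1]
--     ganador = palo_baza_carta
--     for carta in mesa.keys():
--         if carta[1] == palo_triunfo and\
--                        (ganador[1] != palo_triunfo or
--                         VALORES.index(carta[0]) > VALORES.index(ganador[0])):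
--             ganador = carta
--         if carta[1] == palo_baza and\
--                        ganador[1] != palo_triunfo and\
--                        VALORES.index(carta[0]) > VALORES.index(ganador[0]):
--             ganador = carta
--     jugador_ganador = mesa[ganador]
--     return jugador_ganador
-- ===== SOURCE B (Python) =====
-- VALORES = [str(i+1) for i in range(1, 10)] + ['J', 'Q', 'K', 'A']
--
-- def determinar_ganador_baza(mesa: dict, palo_baza_carta: tuple, triunfo: tuple) -> str:
--     """ Devuelve el jugador que ganó la baza. """
--     triunfos = [carta for carta in mesa if carta[1] == triunfo[1]]
--     if palo_baza_carta[1] == triunfo[1]: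
--         triunfos.insert(0, palo_baza_carta)
--     if triunfos:
--         ganador = max(triunfos, key=lambda c: VALORES.index(c[0]))
--     else:
--         seguidas = [palo_baza_carta] + [c for c in mesa if c[1] == palo_baza_carta[1]]
--         ganador = max(seguidas, key=lambda c: VALORES.index(c[0]))
--     return mesa[ganador]
-- ===== Notes on version B (the rewrite author's own statement) =====
-- stated objective: alternative
-- what changed: A's single accumulator loop with two sequential conditional updates is replaced by a staged pipeline: first filter out the trump-suit cards (led card prepended if it is trump), and take the highest of that group if it is nonempty, otherwise the highest of the led card plus the led-suit cards; first-of-ties max reproduces A's strict-improvement rule.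
-- outside the precondition, e.g. on determinar_ganador_baza({('X', 'S'): 'p'}, ('2', 'H'), ('A', 'S')): A returns 'p', B raises ValueError
import Mathlib
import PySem

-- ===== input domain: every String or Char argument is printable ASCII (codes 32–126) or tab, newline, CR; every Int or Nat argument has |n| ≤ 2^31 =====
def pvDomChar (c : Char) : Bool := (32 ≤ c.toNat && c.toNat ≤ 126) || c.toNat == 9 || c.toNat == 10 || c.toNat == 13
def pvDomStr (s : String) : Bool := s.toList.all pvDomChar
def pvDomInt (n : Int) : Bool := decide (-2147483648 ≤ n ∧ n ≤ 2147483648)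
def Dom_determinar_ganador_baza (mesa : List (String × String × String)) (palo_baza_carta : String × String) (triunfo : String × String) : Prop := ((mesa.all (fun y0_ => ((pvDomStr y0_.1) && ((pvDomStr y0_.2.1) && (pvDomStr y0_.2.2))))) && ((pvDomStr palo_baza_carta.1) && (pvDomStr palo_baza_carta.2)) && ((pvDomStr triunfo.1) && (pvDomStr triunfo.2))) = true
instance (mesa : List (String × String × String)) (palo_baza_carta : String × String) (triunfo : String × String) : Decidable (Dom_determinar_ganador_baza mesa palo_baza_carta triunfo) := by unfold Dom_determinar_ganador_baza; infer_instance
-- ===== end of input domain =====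

-- B replaces A's accumulator loop (two conditional updates per card) by a staged pipeline:
-- filter the trump-suit cards and take their max, else the max of led card + led-suit cards
-- (objective: alternative decomposition; same cost).

-- shared module constant: VALORES = [str(i+1) for i in range(1, 10)] + ['J','Q','K','A']
def VALORES : List String :=
  ((PySem.List.pyRange 1 10 1).map (fun i => PySem.Int.toStr (i + 1))) ++ ["J", "Q", "K", "A"]

-- VALORES.index(carta[0]); the .getD 0 default is unreachable under Pre_ (every value a port
-- actually indexes is a member of VALORES there)
def pvIdx (carta : String × String) : Nat := (PySem.List.index? VALORES carta.1).getD 0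

-- ===== PORT A =====
-- the body of A's for-loop over mesa.keys(): the two sequential if-updates of 'ganador'
def stepGanador (palo_triunfo palo_baza : String) (ganador carta : String × String) :
    String × String :=
  let g1 := if carta.2 = palo_triunfo ∧ (ganador.2 ≠ palo_triunfo ∨ pvIdx ganador < pvIdx carta)
            then carta else ganador
  if carta.2 = palo_baza ∧ g1.2 ≠ palo_triunfo ∧ pvIdx g1 < pvIdx carta then carta else g1

def determinar_ganador_baza (mesa : List (String × String × String)) (palo_baza_carta : String × String) (triunfo : String × String) : String :=
  let palo_triunfo := triunfo.2
  let palo_baza := palo_baza_carta.2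
  let ganador := (mesa.map (fun x => (x.1, x.2.1))).foldl
      (stepGanador palo_triunfo palo_baza) palo_baza_carta
  -- mesa[ganador]; the .getD "" default is unreachable under Pre_ (the winner is a key of mesa)
  ((PySem.Dict.mk (mesa.map (fun x => ((x.1, x.2.1), x.2.2)))).get? ganador).getD ""

-- ===== PORT B =====
def determinar_ganador_baza_alt (mesa : List (String × String × String)) (palo_baza_carta : String × String) (triunfo : String × String) : String :=
  let keys := mesa.map (fun x => (x.1, x.2.1))
  -- triunfos = [carta for carta in mesa if carta[1] == triunfo[1]], led card prepended if trump
  let triunfos0 := keys.filter (fun c => c.2 == triunfo.2)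
  let triunfos := if palo_baza_carta.2 = triunfo.2 then palo_baza_carta :: triunfos0 else triunfos0
  -- max(…, key=lambda c: VALORES.index(c[0])); first of ties; the .getD default is
  -- unreachable (each list handed to max? is nonempty)
  let ganador :=
    if triunfos ≠ [] then (PySem.List.max? triunfos pvIdx).getD palo_baza_carta
    else (PySem.List.max?
        (palo_baza_carta :: keys.filter (fun c => c.2 == palo_baza_carta.2)) pvIdx).getD
        palo_baza_carta
  ((PySem.Dict.mk (mesa.map (fun x => ((x.1, x.2.1), x.2.2)))).get? ganador).getD ""

-- ===== PRECONDITION & SPEC =====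
-- first component of the ranking 'trump beats led suit beats rest' (used only by Pre_'s
-- 'some table card beats the led card' clause)
def rankTier (palo_triunfo palo_baza : String) (carta : String × String) : Int :=
  if carta.2 = palo_triunfo then 2 else if carta.2 = palo_baza then 1 else 0

-- Pre_ restricts to well-formed tricks A finishes: every card in play (led card or table card)
-- whose suit is the trump suit or the led suit must carry a value from the deck VALORES —
-- outside, both programs raise ValueError on most such inputs, though each may return by never
-- indexing a malformed card its own evaluation order skips — and the led card must be a key of
-- mesa or beaten by some table card, else A's mesa[ganador] raises KeyError.
def Pre_determinar_ganador_baza (mesa : List (String × String × String)) (palo_baza_carta : String × String) (triunfo : String × String) : Prop :=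
  (∀ c ∈ palo_baza_carta :: mesa.map (fun x => (x.1, x.2.1)),
     c.2 = triunfo.2 ∨ c.2 = palo_baza_carta.2 → c.1 ∈ VALORES) ∧
  (palo_baza_carta ∈ mesa.map (fun x => (x.1, x.2.1)) ∨
   ∃ c ∈ mesa.map (fun x => (x.1, x.2.1)),
     rankTier triunfo.2 palo_baza_carta.2 palo_baza_carta < rankTier triunfo.2 palo_baza_carta.2 c ∨
     (rankTier triunfo.2 palo_baza_carta.2 palo_baza_carta = rankTier triunfo.2 palo_baza_carta.2 c ∧
      pvIdx palo_baza_carta < pvIdx c))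
instance (mesa : List (String × String × String)) (palo_baza_carta : String × String) (triunfo : String × String) : Decidable (Pre_determinar_ganador_baza mesa palo_baza_carta triunfo) := by unfold Pre_determinar_ganador_baza; infer_instance

def pvWitness_determinar_ganador_baza : (List (String × String × String)) × (String × String) × (String × String) :=
  ([("A", "S", "p1"), ("2", "S", "p2")], ("2", "S"), ("K", "H"))

def Spec_determinar_ganador_baza (mesa : List (String × String × String)) (palo_baza_carta : String × String) (triunfo : String × String) (out : String) : Prop := out = determinar_ganador_baza_alt mesa palo_baza_carta triunfo
instance (mesa : List (String × String × String)) (palo_baza_carta : String × String) (triunfo : String × String) (out : String) : Decidable (Spec_determinar_ganador_baza mesa palo_baza_carta triunfo out) := by unfold Spec_determinar_ganador_baza; infer_instance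

-- ===== CLAIM (what is proved, stated in full; the proofs are below) =====
def Claim_equal_determinar_ganador_baza : Prop := ∀ (mesa : List (String × String × String)) (palo_baza_carta : String × String) (triunfo : String × String), Dom_determinar_ganador_baza mesa palo_baza_carta triunfo → Pre_determinar_ganador_baza mesa palo_baza_carta triunfo → Spec_determinar_ganador_baza mesa palo_baza_carta triunfo (determinar_ganador_baza mesa palo_baza_carta triunfo)

-- ===== LEMMAS AND PROOFS =====

-- the running-max step hidden in Python's max(…, key=…): keep the first maximal element
def maxStep (m x : String × String) : String × String := if pvIdx m < pvIdx x then x else m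

-- PySem.List.max? on a nonempty list is the running-max fold with maxStep
theorem max?_cons_foldl (a : String × String) (l : List (String × String)) :
    PySem.List.max? (a :: l) pvIdx = some (l.foldl maxStep a) := by
  show List.foldl _ (some a) l = _
  induction l generalizing a with
  | nil => rfl
  | cons x t ih =>
      show List.foldl _ (if pvIdx a < pvIdx x then some x else some a) t =
        some (List.foldl maxStep (maxStep a x) t)
      rw [← apply_ite some]
      exact ih _

-- once the accumulator holds a trump card, A's step is the running max over trump cards only
theorem foldl_step_trump (pt pb : String) (l : List (String × String)) (g : String × String)
    (hg : g.2 = pt) :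
    l.foldl (stepGanador pt pb) g =
      (l.filter (fun c => c.2 == pt)).foldl maxStep g ∧
    ((l.foldl (stepGanador pt pb) g)).2 = pt := by
  induction l generalizing g with
  | nil => exact ⟨rfl, hg⟩
  | cons c t ih =>
      by_cases hc : c.2 = pt
      · have hstep : stepGanador pt pb g c = maxStep g c := by
          unfold stepGanador maxStep
          by_cases hi : pvIdx g < pvIdx c <;> simp [hc, hg, hi]
        have hm : (maxStep g c).2 = pt := by
          unfold maxStep; split_ifs <;> simp [hc, hg]
        simpa [hc, hstep] using ih (maxStep g c) hm
      · have hstep : stepGanador pt pb g c = g := by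
          unfold stepGanador
          simp [hc, hg]
        simpa [hc, hstep] using ih g hg

-- while no trump has appeared (accumulator suit = led suit ≠ trump): A's fold equals B's
-- staged computation — running max over led-suit cards until the first trump card, which
-- then seeds a running max over the remaining trump cards
theorem foldl_step_led (pt pb : String) (hne : pb ≠ pt) (l : List (String × String))
    (g : String × String) (hg : g.2 = pb) :
    l.foldl (stepGanador pt pb) g =
      (match l.filter (fun c => c.2 == pt) with
       | [] => (l.filter (fun c => c.2 == pb)).foldl maxStep g
       | t :: ts => ts.foldl maxStep t) := by
  induction l generalizing g with
  | nil => rfl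
  | cons c t ih =>
      by_cases hct : c.2 = pt
      · have hstep : stepGanador pt pb g c = c := by
          have hcb : ¬ c.2 = pb := by rw [hct]; exact fun h => hne h.symm
          unfold stepGanador
          simp [hct, hg, hne]
        have := (foldl_step_trump pt pb t c hct).1
        simp [hct, hstep, this]
      · by_cases hcb : c.2 = pb
        · have hstep : stepGanador pt pb g c = maxStep g c := by
            have hgt : ¬ g.2 = pt := by rw [hg]; exact hne
            unfold stepGanador maxStep
            by_cases hi : pvIdx g < pvIdx c <;> simp [hcb, hgt, hi, hne]
          have hm : (maxStep g c).2 = pb := by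
            unfold maxStep; split_ifs <;> simp [hcb, hg]
          have hfc : List.filter (fun x => x.2 == pt) (c :: t) = List.filter (fun x => x.2 == pt) t := by
            simp [hct]
          have hfb : List.filter (fun x => x.2 == pb) (c :: t) = c :: List.filter (fun x => x.2 == pb) t := by
            simp [hcb]
          rw [List.foldl_cons, hstep, ih (maxStep g c) hm, hfc, hfb]
          cases t.filter (fun x => x.2 == pt) <;> rfl
        · have hstep : stepGanador pt pb g c = g := by
            unfold stepGanador
            simp [hct, hcb]
          have hfc : List.filter (fun x => x.2 == pt) (c :: t) = List.filter (fun x => x.2 == pt) t := by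
            simp [hct]
          have hfb : List.filter (fun x => x.2 == pb) (c :: t) = List.filter (fun x => x.2 == pb) t := by
            simp [hcb]
          rw [List.foldl_cons, hstep, ih g hg, hfc, hfb]

-- ===== VERDICT (by name: the statement is the Claim_ definition above) =====
theorem determinar_ganador_baza_spec : Claim_equal_determinar_ganador_baza := by
  intro mesa pbc tri _ _
  unfold Spec_determinar_ganador_baza
  show ((PySem.Dict.mk (mesa.map (fun x => ((x.1, x.2.1), x.2.2)))).get?
      ((mesa.map (fun x => (x.1, x.2.1))).foldl (stepGanador tri.2 pbc.2) pbc)).getD "" =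
    ((PySem.Dict.mk (mesa.map (fun x => ((x.1, x.2.1), x.2.2)))).get?
      (let keys := mesa.map (fun x => (x.1, x.2.1))
       let triunfos0 := keys.filter (fun c => c.2 == tri.2)
       let triunfos := if pbc.2 = tri.2 then pbc :: triunfos0 else triunfos0
       if triunfos ≠ [] then (PySem.List.max? triunfos pvIdx).getD pbc
       else (PySem.List.max?
          (pbc :: keys.filter (fun c => c.2 == pbc.2)) pvIdx).getD pbc)).getD ""
  congr 2
  simp only []
  by_cases hpt : pbc.2 = tri.2
  · -- led card is trump: B's candidate list is pbc :: trump cards, always nonempty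
    rw [(foldl_step_trump tri.2 pbc.2 (mesa.map (fun x => (x.1, x.2.1))) pbc hpt).1,
      if_pos hpt, if_pos (by simp), max?_cons_foldl, Option.getD_some]
  · -- led card not trump: split on whether any trump card was played
    rw [foldl_step_led tri.2 pbc.2 hpt (mesa.map (fun x => (x.1, x.2.1))) pbc rfl, if_neg hpt]
    cases hf : (mesa.map (fun x => (x.1, x.2.1))).filter (fun c => c.2 == tri.2) with
    | nil =>
        rw [if_neg (by simp), max?_cons_foldl, Option.getD_some]
    | cons a l =>
        rw [if_pos (by simp), max?_cons_foldl, Option.getD_some]
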